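-- pv_equiv track=rewrite | github.com/MichalDudekk/ASD | x2022 - egz1A - snow.py | snow_
-- ===== SOURCE A (Python) =====
-- def snow_( S ):
--     n = len(S)
--     S.sort(reverse = True)
--     res = 0
--     time = 0
--     for i in range(n):
--         height = S[i] - time
--         if height <= 0:
--             break
--         res += height
--         time += 1
--     return res
-- ===== SOURCE B (Python) =====
-- def snow_(S):
--     # sorts S in place (same observable mutation as the original)
--     S.sort(reverse=True)
--     lo, hi = 0, len(S)
--     while lo < hi:                      # binary search for the melt cut-off:
--         mid = (lo + hi) // 2            # S[i] - i is strictly decreasing on the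
--         if S[mid] - mid > 0:            # descending list, so the predicate is monotone
--             lo = mid + 1
--         else:
--             hi = mid
--     return sum(S[:lo]) - lo * (lo - 1) // 2
-- ===== Notes on version B (the rewrite author's own statement) =====
-- stated objective: alternative
-- what changed: Replaces the accumulate-and-break loop by a binary search for the melt cut-off k (S[i]-i is monotone on the descending sort) followed by the closed form sum(S[:k]) - k*(k-1)//2 for the accumulated time subtractions.
import Mathlib
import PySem

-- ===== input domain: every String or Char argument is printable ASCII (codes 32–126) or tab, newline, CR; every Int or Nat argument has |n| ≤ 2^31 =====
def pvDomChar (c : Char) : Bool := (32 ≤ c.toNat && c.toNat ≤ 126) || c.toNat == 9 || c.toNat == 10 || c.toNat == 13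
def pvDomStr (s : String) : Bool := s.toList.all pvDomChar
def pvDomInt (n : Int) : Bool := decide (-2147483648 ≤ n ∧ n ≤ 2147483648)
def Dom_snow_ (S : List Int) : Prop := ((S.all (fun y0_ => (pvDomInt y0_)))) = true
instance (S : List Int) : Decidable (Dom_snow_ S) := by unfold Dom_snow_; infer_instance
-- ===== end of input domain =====

-- B replaces A's accumulate-and-break loop by a binary search for the cut-off plus a
-- closed-form triangular-number correction (alternative algorithm, same asymptotic cost).
-- Both Pythons sort S in place; the equivalence proved here is about the return value.

-- ===== PORT A =====
-- the for-loop with break: recursion over the remaining indices, state (res, time);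
-- every index i is in range, so pyGetD is exact for S[i]
def snowLoop (L : List Int) (idxs : List Int) (res time : Int) : Int :=
  match idxs with
  | [] => res
  | i :: rest =>
      let height := PySem.List.pyGetD L i 0 - time
      if height ≤ 0 then res
      else snowLoop L rest (res + height) (time + 1)

def snow_ (S : List Int) : Int :=
  let n : Int := S.length
  let L := PySem.List.sorted S (fun x => x) true
  snowLoop L (PySem.List.pyRange 0 n 1) 0 0

-- ===== PORT B =====
-- the while-loop of Source B: binary search on [lo, hi); mid is always in range, so pyGetD is exact
def snowBisect (L : List Int) (lo hi : Int) : Int :=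
  if h : lo < hi then
    let mid := PySem.Int.floordiv (lo + hi) 2
    if PySem.List.pyGetD L mid 0 - mid > 0 then snowBisect L (mid + 1) hi
    else snowBisect L lo mid
  else lo
termination_by (hi - lo).toNat
decreasing_by
  · have hmid := PySem.Int.floordiv_two_mid_bounds (le_of_lt h)
    omega
  · have hlt : PySem.Int.floordiv (lo + hi) 2 < hi := by
      rw [PySem.Int.floordiv_lt_iff_lt_mul (by omega)]; omega
    omega

def snow__alt (S : List Int) : Int :=
  let L := PySem.List.sorted S (fun x => x) true
  let lo := snowBisect L 0 (L.length : Int)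
  (PySem.List.slice L none (some lo)).sum - PySem.Int.floordiv (lo * (lo - 1)) 2

-- ===== PRECONDITION & SPEC =====
def Spec_snow_ (S : List Int) (out : Int) : Prop := out = snow__alt S
instance (S : List Int) (out : Int) : Decidable (Spec_snow_ S out) := by unfold Spec_snow_; infer_instance

-- ===== CLAIM (what is proved, stated in full; the proofs are below) =====
def Claim_equal_snow_ : Prop := ∀ (S : List Int), Dom_snow_ S → Spec_snow_ S (snow_ S)

-- ===== LEMMAS AND PROOFS =====

-- the break predicate: snow at index j still positive after j days of melt
def snowPred (L : List Int) (j : Nat) : Prop := (j : Int) < L.getD j 0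

-- on a descending list the predicate is downward closed
lemma snowPred_mono {L : List Int} (hL : L.Pairwise (fun a b => b ≤ a))
    {i j : Nat} (hij : i ≤ j) (hj : j < L.length) (hp : snowPred L j) : snowPred L i := by
  unfold snowPred at *
  have hi : i < L.length := lt_of_le_of_lt hij hj
  have hle : L[j] ≤ L[i] := by
    rcases eq_or_lt_of_le hij with rfl | hlt
    · exact le_refl _
    · exact (List.pairwise_iff_getElem.mp hL i j hi hj hlt)
  rw [List.getD_eq_getElem?_getD, List.getElem?_eq_getElem hj] at hp
  rw [List.getD_eq_getElem?_getD, List.getElem?_eq_getElem hi]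
  simp only [Option.getD_some] at *
  omega

lemma snowBisect_spec (L : List Int) (hL : L.Pairwise (fun a b => b ≤ a)) :
    ∀ (fuel : Nat) (lo hi : Int), (hi - lo).toNat ≤ fuel → 0 ≤ lo → lo ≤ hi → hi ≤ (L.length : Int) →
    (∀ j : Nat, (j : Int) < lo → snowPred L j) →
    (∀ j : Nat, hi ≤ (j : Int) → j < L.length → ¬ snowPred L j) →
    lo ≤ snowBisect L lo hi ∧ snowBisect L lo hi ≤ hi ∧
    (∀ j : Nat, (j : Int) < snowBisect L lo hi → snowPred L j) ∧
    (∀ j : Nat, snowBisect L lo hi ≤ (j : Int) → j < L.length → ¬ snowPred L j) := by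
  intro fuel
  induction fuel with
  | zero =>
      intro lo hi hfuel h0 hlh hhn hlo hhi
      have heq : lo = hi := by omega
      rw [snowBisect]
      rw [dif_neg (by omega)]
      refine ⟨le_refl _, hlh, hlo, ?_⟩
      intro j hj hjn
      exact hhi j (heq ▸ hj) hjn
  | succ fuel ih =>
      intro lo hi hfuel h0 hlh hhn hlo hhi
      rw [snowBisect]
      by_cases h : lo < hi
      · rw [dif_pos h]
        have hmid := PySem.Int.floordiv_two_mid_bounds (le_of_lt h)
        have hmlt : PySem.Int.floordiv (lo + hi) 2 < hi := by
          rw [PySem.Int.floordiv_lt_iff_lt_mul (by omega)]; omega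
        set mid := PySem.Int.floordiv (lo + hi) 2 with hmiddef
        have hm0 : 0 ≤ mid := le_trans h0 hmid.1
        have hmn : mid < (L.length : Int) := lt_of_lt_of_le hmlt hhn
        set m : Nat := mid.toNat with hmdef
        have hmcast : (m : Int) = mid := Int.toNat_of_nonneg hm0
        have hmlen : m < L.length := by omega
        have hget : PySem.List.pyGetD L mid 0 = L[m] :=
          PySem.List.pyGetD_eq_getElem L 0 hm0 hmn
        have hpredm : snowPred L m ↔ (m : Int) < L[m] := by
          unfold snowPred
          rw [List.getD_eq_getElem?_getD, List.getElem?_eq_getElem hmlen]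
          simp
        by_cases hc : PySem.List.pyGetD L mid 0 - mid > 0
        · rw [if_pos hc]
          have hpm : snowPred L m := by rw [hpredm]; rw [hget] at hc; omega
          have := ih (mid + 1) hi (by omega) (by omega) (by omega) hhn
            (fun j hj => by
              by_cases hje : (j : Int) < mid
              · exact snowPred_mono hL (by omega : j ≤ m) hmlen hpm
              · have : j = m := by omega
                exact this ▸ hpm)
            hhi
          exact ⟨by omega, this.2.1, this.2.2.1, this.2.2.2⟩
        · rw [if_neg hc]
          have hnm : ¬ snowPred L m := by
            rw [hpredm]; rw [hget] at hc; omega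
          have := ih lo mid (by omega) h0 hmid.1 (by omega) hlo
            (fun j hj hjn hp => hnm (snowPred_mono hL (by omega : m ≤ j) hjn hp))
          exact ⟨this.1, by omega, this.2.2.1, this.2.2.2⟩
      · rw [dif_neg h]
        have heq : lo = hi := by omega
        refine ⟨le_refl _, hlh, hlo, ?_⟩
        intro j hj hjn
        exact hhi j (heq ▸ hj) hjn

lemma snowLoop_eq (L : List Int) (r : Nat)
    (hr : r ≤ L.length)
    (hend : r = L.length ∨ ¬ snowPred L r) :
    ∀ (d t : Nat) (res : Int), r = t + d → (∀ j : Nat, t ≤ j → j < r → snowPred L j) →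
    snowLoop L (PySem.List.pyRange (t : Int) (L.length : Int) 1) res (t : Int)
      = res + ∑ j ∈ Finset.Ico t r, (L.getD j 0 - (j : Int)) := by
  intro d
  induction d with
  | zero =>
      intro t res hd _
      have ht : t = r := by omega
      subst ht
      rcases Nat.lt_or_ge t L.length with hlt | hge
      · have hnp : ¬ snowPred L t := by
          rcases hend with h1 | h2
          · omega
          · exact h2
        rw [PySem.List.pyRange_one_cons (by exact_mod_cast hlt)]
        rw [snowLoop]
        have hget : PySem.List.pyGetD L (t : Int) 0 = L.getD t 0 := by
          simp [PySem.List.pyGetD_natCast]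
        rw [if_pos (by
          unfold snowPred at hnp
          rw [hget]; omega)]
        simp
      · have ht : t = L.length := by omega
        rw [PySem.List.pyRange_one_eq_nil (by exact_mod_cast hge)]
        rw [snowLoop]
        simp
  | succ d ih =>
      intro t res hd hpr
      have htr : t < r := by omega
      have htl : t < L.length := by omega
      rw [PySem.List.pyRange_one_cons (by exact_mod_cast htl)]
      rw [snowLoop]
      have hget : PySem.List.pyGetD L (t : Int) 0 = L.getD t 0 := by
        simp [PySem.List.pyGetD_natCast]
      have hpt : snowPred L t := hpr t (le_refl _) htr
      unfold snowPred at hpt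
      rw [if_neg (by rw [hget]; omega)]
      have hcast : ((t : Int) + 1) = ((t + 1 : Nat) : Int) := by push_cast; ring
      rw [hget, hcast]
      rw [ih (t + 1) (res + (L.getD t 0 - (t : Int))) (by omega)
        (fun j hj hjr => hpr j (by omega) hjr)]
      rw [Finset.sum_eq_sum_Ico_succ_bot htr]
      ring

lemma take_sum_eq (L : List Int) : ∀ k : Nat, k ≤ L.length →
    (L.take k).sum = ∑ j ∈ Finset.range k, L.getD j 0 := by
  intro k
  induction k with
  | zero => simp
  | succ k ih =>
      intro hk
      have hkl : k < L.length := by omega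
      rw [List.take_add_one, List.getElem?_eq_getElem hkl]
      rw [List.sum_append, ih (by omega), Finset.sum_range_succ]
      rw [List.getD_eq_getElem?_getD, List.getElem?_eq_getElem hkl]
      simp

lemma gauss (k : Nat) :
    PySem.Int.floordiv ((k : Int) * ((k : Int) - 1)) 2 = ∑ j ∈ Finset.range k, (j : Int) := by
  rw [PySem.Int.floordiv_eq_ediv_of_pos (by omega)]
  induction k with
  | zero => simp
  | succ k ih =>
      rw [Finset.sum_range_succ, ← ih]
      have h2 : ((k + 1 : Nat) : Int) * (((k + 1 : Nat) : Int) - 1)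
          = (k : Int) * ((k : Int) - 1) + (k : Int) * 2 := by push_cast; ring
      rw [h2, Int.add_mul_ediv_right _ _ (by omega : (2 : Int) ≠ 0)]

-- ===== VERDICT (by name: the statement is the Claim_ definition above) =====
theorem snow__spec : Claim_equal_snow_ := by
  intro S _
  unfold Spec_snow_
  set L := PySem.List.sorted S (fun x => x) true with hLdef
  have hL : L.Pairwise (fun a b => b ≤ a) := PySem.List.sorted_pairwise_rev S (fun x => x)
  have hlen : (L.length : Int) = (S.length : Int) := by
    rw [hLdef, PySem.List.length_sorted]
  set r := snowBisect L 0 (L.length : Int) with hrdef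
  have e1 : snow_ S = snowLoop L (PySem.List.pyRange 0 (S.length : Int) 1) 0 0 := rfl
  have e2 : snow__alt S
      = (PySem.List.slice L none (some r)).sum - PySem.Int.floordiv (r * (r - 1)) 2 := rfl
  rw [e1, e2]
  obtain ⟨hr0, hrn, hpred, hnot⟩ := snowBisect_spec L hL (L.length : Int).toNat 0 (L.length : Int)
    (by omega) (le_refl _) (Int.natCast_nonneg _) (le_refl _)
    (fun j hj => absurd hj (by omega))
    (fun j hj hjn => absurd hj (by omega))
  set k := r.toNat with hkdef
  have hkcast : (k : Int) = r := Int.toNat_of_nonneg hr0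
  have hkle : k ≤ L.length := by omega
  have hend : k = L.length ∨ ¬ snowPred L k := by
    rcases Nat.lt_or_ge k L.length with h | h
    · exact Or.inr (hnot k (by omega) h)
    · exact Or.inl (by omega)
  have hA := snowLoop_eq L k hkle hend k 0 0 (by omega)
    (fun j _ hjk => hpred j (by omega))
  rw [Nat.cast_zero] at hA
  rw [← hlen, hA]
  have hslice : PySem.List.slice L none (some r) = L.take k := PySem.List.slice_to L hr0
  rw [hslice, take_sum_eq L k hkle, ← hkcast, gauss k]
  rw [zero_add, ← Finset.range_eq_Ico, Finset.sum_sub_distrib]
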